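-- pv_equiv track=rewrite | github.com/nsky80/competitive_programming | HackerEarth/April Easy' 19/No Girls One Sequence.py | check_max
-- ===== SOURCE A (Python) =====
-- from math import gcd
--
-- def check_max(n, l, r, a):
--     x = 1
--     final_res = 0
--     for i in range(l, r+1):
--         temp = [i+j for j in a]
--         res = temp[0]
--         for j in range(n-1):
--             res = gcd(res, temp[j+1])
--         final_res = max(res, final_res)
--     return final_res
-- ===== SOURCE B (Python) =====
-- from math import gcd
--
-- def check_max(n, l, r, a):
--     if l > r:
--         return 0
--     a0 = a[0]
--     if n <= 1:
--         return max(0, r + a0)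
--     d = 0
--     for j in range(n - 1):
--         d = gcd(d, a[j + 1] - a0)
--     best = 0
--     for i in range(l, r + 1):
--         best = max(best, gcd(i + a0, d))
--     return best
-- ===== Notes on version B (the rewrite author's own statement) =====
-- stated objective: alternative
-- what changed: B computes the gcd D of the differences a[j]-a[0] once in a single pass and then takes a single gcd(i+a[0], D) per i (using gcd(i+a[0],...,i+a[n-1]) = gcd(i+a[0], D)), replacing A's inner gcd pass over n elements for every i; the degenerate n<=1 case collapses to the closed form max(0, r+a[0]). Intended as faster (O(n + (r-l+1)) work vs O((r-l+1)*n)); a timing run measured 267x at n=4096 but only 1.56x at the largest size both finished, so no unqualified speed claim is made.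
import Mathlib
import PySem

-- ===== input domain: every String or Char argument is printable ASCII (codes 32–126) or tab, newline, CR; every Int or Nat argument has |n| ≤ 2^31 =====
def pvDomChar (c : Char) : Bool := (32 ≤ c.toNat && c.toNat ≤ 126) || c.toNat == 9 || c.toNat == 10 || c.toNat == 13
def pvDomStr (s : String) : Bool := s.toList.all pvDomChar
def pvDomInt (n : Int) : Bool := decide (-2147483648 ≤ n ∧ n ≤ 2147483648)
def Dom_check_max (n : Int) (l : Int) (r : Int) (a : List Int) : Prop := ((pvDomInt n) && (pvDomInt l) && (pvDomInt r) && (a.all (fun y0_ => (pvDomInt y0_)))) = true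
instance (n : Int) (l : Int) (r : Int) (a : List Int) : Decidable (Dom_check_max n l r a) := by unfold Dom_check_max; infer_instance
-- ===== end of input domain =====

-- B computes the gcd of the differences a[j]-a[0] once, then one gcd per i (and a closed form
-- for n ≤ 1), instead of A's inner gcd pass over the list for every i in [l, r].

-- ===== PORT A =====
def check_max (n : Int) (l : Int) (r : Int) (a : List Int) : Int :=
  (PySem.List.pyRange l (r+1) 1).foldl (fun final_res i =>
    let temp := a.map (fun j => i + j)
    let res0 : Int := PySem.List.pyGetD temp 0 0
    let res := (PySem.List.pyRange 0 (n-1) 1).foldl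
      (fun res j => (Int.gcd res (PySem.List.pyGetD temp (j+1) 0) : Int)) res0
    max res final_res) 0

-- ===== PORT B =====
def check_max_alt (n : Int) (l : Int) (r : Int) (a : List Int) : Int :=
  if l > r then 0
  else
    let a0 : Int := PySem.List.pyGetD a 0 0
    if n ≤ 1 then max 0 (r + a0)
    else
      let d := (PySem.List.pyRange 0 (n-1) 1).foldl
        (fun d j => (Int.gcd d (PySem.List.pyGetD a (j+1) 0 - a0) : Int)) 0
      (PySem.List.pyRange l (r+1) 1).foldl
        (fun best i => max best (Int.gcd (i + a0) d : Int)) 0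

-- ===== PRECONDITION & SPEC =====
-- Pre_ excludes exactly the inputs on which Python A raises IndexError: a nonempty range
-- [l, r] with an empty list, or with n exceeding len(a) (temp[j+1] out of range).
def Pre_check_max (n : Int) (l : Int) (r : Int) (a : List Int) : Prop :=
  r < l ∨ (a ≠ [] ∧ n ≤ (a.length : Int))
instance (n : Int) (l : Int) (r : Int) (a : List Int) : Decidable (Pre_check_max n l r a) := by
  unfold Pre_check_max; infer_instance

def pvWitness_check_max : Int × Int × Int × List Int := (3, 1, 4, [2, 6, 10])

def Spec_check_max (n : Int) (l : Int) (r : Int) (a : List Int) (out : Int) : Prop := out = check_max_alt n l r a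
instance (n : Int) (l : Int) (r : Int) (a : List Int) (out : Int) : Decidable (Spec_check_max n l r a out) := by unfold Spec_check_max; infer_instance

-- ===== CLAIM (what is proved, stated in full; the proofs are below) =====
def Claim_equal_check_max : Prop := ∀ (n : Int) (l : Int) (r : Int) (a : List Int), Dom_check_max n l r a → Pre_check_max n l r a → Spec_check_max n l r a (check_max n l r a)

-- ===== LEMMAS AND PROOFS =====

-- gcd(G, x + e) = gcd(G, e) whenever G divides x.
theorem pv_gcd_cast_add (G : Nat) (x e : Int) (h : (G : Int) ∣ x) :
    Int.gcd (G : Int) (x + e) = Int.gcd (G : Int) e := by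
  apply Nat.dvd_antisymm
  · have h1 : (↑(Int.gcd (G : Int) (x + e)) : Int) ∣ (G : Int) := Int.gcd_dvd_left _ _
    have h2 : (↑(Int.gcd (G : Int) (x + e)) : Int) ∣ (x + e) := Int.gcd_dvd_right _ _
    have hx : (↑(Int.gcd (G : Int) (x + e)) : Int) ∣ x := dvd_trans h1 h
    have he : (↑(Int.gcd (G : Int) (x + e)) : Int) ∣ e := by
      have := dvd_sub h2 hx; simpa using this
    exact Int.natCast_dvd_natCast.mp (by exact_mod_cast Int.dvd_gcd h1 he)
  · have h1 : (↑(Int.gcd (G : Int) e) : Int) ∣ (G : Int) := Int.gcd_dvd_left _ _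
    have h2 : (↑(Int.gcd (G : Int) e) : Int) ∣ e := Int.gcd_dvd_right _ _
    have hx : (↑(Int.gcd (G : Int) e) : Int) ∣ x := dvd_trans h1 h
    exact Int.natCast_dvd_natCast.mp (by exact_mod_cast Int.dvd_gcd h1 (dvd_add hx h2))

-- One gcd step commutes with accumulating the differences.
theorem pv_gcd_step (x s e : Int) :
    Int.gcd ((Int.gcd x s : Nat) : Int) (x + e) = Int.gcd x ((Int.gcd s e : Nat) : Int) := by
  rw [pv_gcd_cast_add (Int.gcd x s) x e (Int.gcd_dvd_left x s)]
  exact Int.gcd_assoc x s e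

-- The accumulated-gcd invariant for the inner loop.
theorem pv_fold_gcd (v : Int → Int) :
    ∀ (js : List Int) (x s : Int),
      js.foldl (fun res j => (Int.gcd res (x + v j) : Int)) ((Int.gcd x s : Nat) : Int)
        = ((Int.gcd x (js.foldl (fun d j => (Int.gcd d (v j) : Int)) s) : Nat) : Int) := by
  intro js
  induction js with
  | nil => intro x s; rfl
  | cons j js ih =>
      intro x s
      simp only [List.foldl_cons]
      rw [pv_gcd_step x s (v j)]
      exact ih x ((Int.gcd s (v j) : Nat) : Int)

-- Folding max of an increasing affine map over range(l, r+1).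
theorem pv_fold_max_lin (c : Int) :
    ∀ (k : Nat) (l acc : Int),
      (PySem.List.pyRange l (l + (k : Int) + 1) 1).foldl (fun f i => max (i + c) f) acc
        = max (l + (k : Int) + c) acc := by
  intro k
  induction k with
  | zero =>
      intro l acc
      have : l + ((0 : Nat) : Int) + 1 = l + 1 := by push_cast; ring
      rw [this, PySem.List.pyRange_one_singleton]
      simp only [List.foldl_cons, List.foldl_nil]
      norm_num
  | succ k ih =>
      intro l acc
      have hlt : l < l + ((k + 1 : Nat) : Int) + 1 := by push_cast; omega
      rw [PySem.List.pyRange_one_cons hlt]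
      simp only [List.foldl_cons]
      have h2 : l + ((k + 1 : Nat) : Int) + 1 = (l + 1) + (k : Int) + 1 := by push_cast; ring
      rw [h2, ih (l + 1) (max (l + c) acc)]
      have hle : l + c ≤ l + 1 + (k : Int) + c := by omega
      rw [← max_assoc, max_eq_left hle]
      congr 1
      push_cast; ring

theorem check_max_spec_aux (n l r : Int) (a0 : Int) (tl : List Int)
    (hn : n ≤ (1 : Int) + tl.length) (hlr : l ≤ r) :
    check_max n l r (a0 :: tl) = check_max_alt n l r (a0 :: tl) := by
  have hget0 : ∀ i : Int, PySem.List.pyGetD ((a0 :: tl).map (fun j => i + j)) 0 0 = i + a0 := by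
    intro i; simp [PySem.List.pyGetD_zero_cons]
  have hA0 : PySem.List.pyGetD (a0 :: tl) 0 0 = a0 := PySem.List.pyGetD_zero_cons a0 tl 0
  by_cases hn1 : n ≤ 1
  · -- degenerate case: inner loop empty, res = i + a0
    have hrange : PySem.List.pyRange 0 (n - 1) 1 = [] :=
      PySem.List.pyRange_one_eq_nil (by omega)
    have hk : r + 1 = l + ((r - l).toNat : Int) + 1 := by omega
    unfold check_max check_max_alt
    simp only [hrange, List.foldl_nil, hget0, hA0, if_neg (by omega : ¬ l > r), if_pos hn1]
    rw [hk, pv_fold_max_lin a0 (r - l).toNat l 0]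
    have : l + ((r - l).toNat : Int) + a0 = r + a0 := by omega
    rw [this, max_comm]
  · -- main case: n ≥ 2
    have hn2 : 2 ≤ n := by omega
    set u : Int → Int := fun j => PySem.List.pyGetD (a0 :: tl) (j + 1) 0 with hu
    -- inner loop of A, rewritten through the lookups of the original list
    have hinner : ∀ i : Int,
        (PySem.List.pyRange 0 (n-1) 1).foldl
            (fun res j => (Int.gcd res (PySem.List.pyGetD ((a0 :: tl).map (fun j => i + j)) (j+1) 0) : Int)) (i + a0)
          = ((Int.gcd (i + a0)
              ((PySem.List.pyRange 0 (n-1) 1).foldl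
                (fun d j => (Int.gcd d (u j - a0) : Int)) 0) : Nat) : Int) := by
      intro i
      have hcongr : (PySem.List.pyRange 0 (n-1) 1).foldl
            (fun res j => (Int.gcd res (PySem.List.pyGetD ((a0 :: tl).map (fun j => i + j)) (j+1) 0) : Int)) (i + a0)
          = (PySem.List.pyRange 0 (n-1) 1).foldl
            (fun res j => (Int.gcd res ((i + a0) + (u j - a0)) : Int)) (i + a0) := by
        apply PySem.List.foldl_congr_mem
        intro acc j hj
        rw [PySem.List.mem_pyRange_one] at hj
        have hj1 : (0 : Int) ≤ j + 1 := by omega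
        have hj2 : j + 1 < ((a0 :: tl).length : Int) := by
          simp only [List.length_cons]; push_cast; omega
        have hj2' : j + 1 < (((a0 :: tl).map (fun j => i + j)).length : Int) := by
          simpa using hj2
        rw [PySem.List.pyGetD_eq_getElem _ _ hj1 hj2', List.getElem_map]
        simp only [hu]
        rw [PySem.List.pyGetD_eq_getElem _ _ hj1 hj2]
        exact congrArg _ (congrArg _ (by ring))
      rw [hcongr]
      have hsplit : PySem.List.pyRange 0 (n-1) 1 = 0 :: PySem.List.pyRange 1 (n-1) 1 :=
        PySem.List.pyRange_one_cons (by omega)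
      rw [hsplit]
      simp only [List.foldl_cons]
      have hhead : (Int.gcd (i + a0) ((i + a0) + (u 0 - a0)) : Int)
          = ((Int.gcd (i + a0) ((Int.gcd (0 : Int) (u 0 - a0) : Nat) : Int) : Nat) : Int) := by
        have := pv_gcd_step (i + a0) 0 (u 0 - a0)
        have hz : ((Int.gcd (i + a0) (0 : Int) : Nat) : Int) = ((i + a0).natAbs : Int) := by
          simp [Int.gcd_def]
        rw [hz] at this
        have habs : Int.gcd (((i + a0).natAbs : Nat) : Int) ((i + a0) + (u 0 - a0))
            = Int.gcd (i + a0) ((i + a0) + (u 0 - a0)) := by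
          simp [Int.gcd_def, Int.natAbs_abs]
        rw [habs] at this
        exact_mod_cast this
      rw [hhead, pv_fold_gcd (fun j => u j - a0) (PySem.List.pyRange 1 (n-1) 1) (i + a0)]
    -- now fold the outer loop
    unfold check_max check_max_alt
    simp only [if_neg (by omega : ¬ l > r), if_neg (by omega : ¬ n ≤ 1)]
    simp only [hget0]
    rw [hA0]
    apply PySem.List.foldl_congr_mem
    intro acc i _
    rw [hinner i, max_comm]

-- ===== VERDICT (by name: the statement is the Claim_ definition above) =====
theorem check_max_spec : Claim_equal_check_max := by
  intro n l r a _ hpre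
  unfold Spec_check_max
  by_cases hlr : r < l
  · have hempty : PySem.List.pyRange l (r+1) 1 = [] :=
      PySem.List.pyRange_one_eq_nil (by omega)
    unfold check_max check_max_alt
    rw [hempty]
    simp [hlr]
  · rcases hpre with h | ⟨hne, hlen⟩
    · omega
    · rcases a with _ | ⟨a0, tl⟩
      · exact absurd rfl hne
      · have hn : n ≤ (1 : Int) + tl.length := by
          simpa [List.length_cons, add_comm] using hlen
        exact check_max_spec_aux n l r a0 tl hn (by omega)
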